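-- pv_equiv track=rewrite | github.com/melihbasayigit/tdk_list | main.py | findNonTurkishLetters
-- ===== SOURCE A (Python) =====
-- def findNonTurkishLetters(NewLines: list) -> str:
--     alphabet = "abcçdefgğhıijklmnoöprsştuüvyz\n"
--     removableChars = ""
--
--     for line in NewLines:
--         for char in alphabet:
--             line = line.replace(char, "")
--         if "" != line:
--             if len(line) > 1:
--                 for _char in line:
--                     if _char not in removableChars:
--                         removableChars+=_char
--             else:
--                 if line not in removableChars:
--                     removableChars+=line
--     return removableChars
-- ===== SOURCE B (Python) =====
-- def findNonTurkishLetters(NewLines: list) -> str: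
--     alphabet = set("abcçdefgğhıijklmnoöprsştuüvyz\n")
--     removableChars = []
--     for line in NewLines:
--         for char in line:
--             if char not in alphabet and char not in removableChars:
--                 removableChars.append(char)
--     return "".join(removableChars)
-- ===== Notes on version B (the rewrite author's own statement) =====
-- stated objective: faster
-- what changed: Replaces A's per-line 30-pass str.replace scrub plus separate length-dependent dedup phase with a single character pass that filters against a prebuilt alphabet set and dedups in first-occurrence order.
import Mathlib
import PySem

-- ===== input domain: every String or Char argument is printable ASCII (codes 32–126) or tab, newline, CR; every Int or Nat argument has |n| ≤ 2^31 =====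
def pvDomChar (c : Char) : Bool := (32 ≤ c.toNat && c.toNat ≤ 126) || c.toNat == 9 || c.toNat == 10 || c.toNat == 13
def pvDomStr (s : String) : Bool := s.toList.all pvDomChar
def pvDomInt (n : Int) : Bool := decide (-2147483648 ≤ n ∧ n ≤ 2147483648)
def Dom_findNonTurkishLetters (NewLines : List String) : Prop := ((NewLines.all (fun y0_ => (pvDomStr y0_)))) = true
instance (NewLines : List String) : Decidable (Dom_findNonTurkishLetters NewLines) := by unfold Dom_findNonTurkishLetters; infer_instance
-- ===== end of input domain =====

-- B replaces A's per-line 30-pass str.replace scrub and separate dedup phase with one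
-- membership-filtered character pass against a prebuilt alphabet set (objective: faster, measured).


-- ===== PORT A =====
def findNonTurkishLetters (NewLines : List String) : String :=
  let alphabet : List Char := "abcçdefgğhıijklmnoöprsştuüvyz\n".toList
  let removableChars : List Char :=
    NewLines.foldl (fun removableChars line0 =>
      -- for char in alphabet: line = line.replace(char, "")
      let line := alphabet.foldl (fun l ch => PySem.Chars.replace l [ch] []) line0.toList
      if line ≠ [] then
        if line.length > 1 then
          -- for _char in line: if _char not in removableChars: removableChars += _char
          line.foldl (fun rc ch =>
            if PySem.Chars.isIn [ch] rc = false then rc ++ [ch] else rc) removableChars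
        else
          -- if line not in removableChars: removableChars += line
          if PySem.Chars.isIn line removableChars = false then removableChars ++ line
          else removableChars
      else removableChars) []
  String.mk removableChars

-- ===== PORT B =====
def findNonTurkishLetters_alt (NewLines : List String) : String :=
  let alphabet : PySem.Set Char := PySem.Set.ofList "abcçdefgğhıijklmnoöprsştuüvyz\n".toList
  let removableChars : List Char :=
    NewLines.foldl (fun rc line =>
      line.toList.foldl (fun rc ch =>
        if (!alphabet.contains ch && !rc.contains ch) then rc ++ [ch] else rc) rc) []
  String.mk (PySem.Chars.join [] (removableChars.map (fun c => [c])))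

-- ===== PRECONDITION & SPEC =====
def Spec_findNonTurkishLetters (NewLines : List String) (out : String) : Prop := out = findNonTurkishLetters_alt NewLines
instance (NewLines : List String) (out : String) : Decidable (Spec_findNonTurkishLetters NewLines out) := by unfold Spec_findNonTurkishLetters; infer_instance

-- ===== CLAIM (what is proved, stated in full; the proofs are below) =====
def Claim_equal_findNonTurkishLetters : Prop := ∀ (NewLines : List String), Dom_findNonTurkishLetters NewLines → Spec_findNonTurkishLetters NewLines (findNonTurkishLetters NewLines)

-- ===== LEMMAS AND PROOFS =====

-- replace.go with a single-char pattern and empty replacement is a filter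
theorem pv_go_filter (c : Char) : ∀ (fuel : Nat) (l acc : List Char), l.length ≤ fuel →
    PySem.Chars.replace.go [c] [] fuel l acc = acc.reverse ++ l.filter (· ≠ c) := by
  intro fuel
  induction fuel with
  | zero => intro l acc h; simp at h; subst h; simp [PySem.Chars.replace.go]
  | succ n ih =>
    intro l acc h
    cases l with
    | nil => simp [PySem.Chars.replace.go]
    | cons x t =>
      simp only [PySem.Chars.replace.go]
      by_cases hx : x = c
      · subst hx
        simp [List.isPrefixOf, ih t acc (by simpa using h)]
      · have hp : [c].isPrefixOf (x :: t) = false := by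
          simp [List.isPrefixOf]; exact fun h' => hx h'.symm
        rw [hp]
        simp only [Bool.false_eq_true, if_false]
        rw [ih t (x :: acc) (by simpa using h)]
        simp [hx]

theorem pv_replace_filter (c : Char) (l : List Char) :
    PySem.Chars.replace l [c] [] = l.filter (· ≠ c) := by
  simp [PySem.Chars.replace, pv_go_filter c l.length l [] le_rfl]

-- folding single-char replaces over an alphabet = one filter against the alphabet
theorem pv_fold_replace (A : List Char) : ∀ (l : List Char),
    A.foldl (fun l ch => PySem.Chars.replace l [ch] []) l
      = l.filter (fun c => ¬ A.contains c) := by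
  induction A with
  | nil => intro l; simp
  | cons a A ih =>
    intro l
    simp only [List.foldl_cons]
    rw [pv_replace_filter, ih, List.filter_filter]
    apply List.filter_congr
    intro c _
    by_cases h1 : c = a <;> simp [h1]

-- 'c (a 1-char string) in s' is list membership
theorem pv_isIn_single (c : Char) (s : List Char) :
    PySem.Chars.isIn [c] s = s.contains c := by
  by_cases h : c ∈ s
  · rw [(PySem.Chars.isIn_iff_infix [c] s).mpr ((List.singleton_infix_iff c s).mpr h)]
    simp [h]
  · rw [(PySem.Chars.isIn_eq_false_iff [c] s).mpr (fun hi => h ((List.singleton_infix_iff c s).mp hi))]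
    simp [h]

def pvDedup (rc : List Char) (c : Char) : List Char :=
  if rc.contains c = false then rc ++ [c] else rc

-- B's filtered pass = filter-then-dedup-fold
theorem pv_alt_inner (p : Char → Bool) : ∀ (l : List Char) (rc : List Char),
    l.foldl (fun rc ch => if (p ch && !rc.contains ch) then rc ++ [ch] else rc) rc
      = (l.filter p).foldl pvDedup rc := by
  intro l
  induction l with
  | nil => intro rc; simp
  | cons x t ih =>
    intro rc
    simp only [List.foldl_cons]
    rw [ih]
    by_cases hp : p x = true <;> simp [hp, pvDedup]

-- A's per-line branch = dedup fold over the filtered line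
theorem pv_a_inner (f rc : List Char) :
    (if f ≠ [] then
        if f.length > 1 then
          f.foldl (fun rc ch => if PySem.Chars.isIn [ch] rc = false then rc ++ [ch] else rc) rc
        else
          if PySem.Chars.isIn f rc = false then rc ++ f else rc
      else rc)
      = f.foldl pvDedup rc := by
  have hfun : (fun rc ch => if PySem.Chars.isIn [ch] rc = false then rc ++ [ch] else rc) = pvDedup := by
    funext rc ch
    simp [pv_isIn_single, pvDedup]
  match f with
  | [] => simp
  | [c] => simp [pv_isIn_single, pvDedup]
  | c1 :: c2 :: t => simp [hfun]

-- ===== VERDICT (by name: the statement is the Claim_ definition above) =====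
theorem findNonTurkishLetters_spec : Claim_equal_findNonTurkishLetters := by
  intro NewLines _
  unfold Spec_findNonTurkishLetters findNonTurkishLetters findNonTurkishLetters_alt
  simp only [PySem.Chars.join_nil_singletons]
  refine congrArg String.mk ?_
  apply PySem.List.foldl_congr_mem
  intro rc line _
  rw [pv_fold_replace, pv_a_inner, pv_alt_inner]
  refine congrArg _ ?_
  apply List.filter_congr
  intro c _
  simp [PySem.Set.contains, PySem.Set.mem_ofList]
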